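-- pv_equiv track=rewrite | github.com/WargaLab-Information-Systems/algoritma-pemrograman-1C-2025 | modul-6/250441100065_Mustofa_AsprakKakAinunSofia/soal2.py | gabung_dan_urutkan
-- ===== SOURCE A (Python) =====
-- def gabung_dan_urutkan(t1, t2):
--     gabungan = t1 + t2
--
--     tanpa_duplikat = []
--     for angka in gabungan:
--         if angka not in tanpa_duplikat:
--             tanpa_duplikat.append(angka)
--
--     for i in range(len(tanpa_duplikat)):
--         for j in range(i + 1, len(tanpa_duplikat)):
--             if tanpa_duplikat[i] < tanpa_duplikat[j]:
--                 tanpa_duplikat[i], tanpa_duplikat[j] = tanpa_duplikat[j], tanpa_duplikat[i]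
--
--     return tuple(tanpa_duplikat)
-- ===== SOURCE B (Python) =====
-- def gabung_dan_urutkan(t1, t2):
--     s = sorted(t1 + t2, reverse=True)
--     hasil = []
--     for x in s:
--         if not hasil or x != hasil[-1]:
--             hasil.append(x)
--     return tuple(hasil)
-- ===== Notes on version B (the rewrite author's own statement) =====
-- stated objective: faster
-- what changed: B sorts the combined list descending first (library sort) and removes duplicates in a single adjacent-comparison pass, instead of A's quadratic membership-scan dedup followed by a quadratic exchange sort.
import Mathlib
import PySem

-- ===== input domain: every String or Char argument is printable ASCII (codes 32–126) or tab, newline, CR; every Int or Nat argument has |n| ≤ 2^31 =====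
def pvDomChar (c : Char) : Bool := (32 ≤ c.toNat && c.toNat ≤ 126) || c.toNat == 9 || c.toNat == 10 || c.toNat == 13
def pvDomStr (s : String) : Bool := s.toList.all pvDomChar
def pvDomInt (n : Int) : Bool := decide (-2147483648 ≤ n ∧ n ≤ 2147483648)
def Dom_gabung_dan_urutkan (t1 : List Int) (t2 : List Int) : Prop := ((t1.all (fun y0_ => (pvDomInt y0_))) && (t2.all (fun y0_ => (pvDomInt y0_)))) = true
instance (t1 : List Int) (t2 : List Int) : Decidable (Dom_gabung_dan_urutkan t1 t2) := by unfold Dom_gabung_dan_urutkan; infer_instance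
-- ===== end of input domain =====

-- B sorts the combined list descending with one library sort, then removes duplicates in a
-- single adjacent-comparison pass, replacing A's membership-scan dedup + quadratic exchange sort.


-- ===== PORT A =====
-- first loop of A: keep each number only if not already collected
def pvDedupA (gabungan : List Int) : List Int :=
  gabungan.foldl (fun acc angka => if angka ∈ acc then acc else acc ++ [angka]) []

-- inner loop of A (the j-loop for a fixed i): the value at position i is carried as `x`;
-- whenever x < y the two positions are swapped (x is written at j, y becomes the carried value).
-- Returns (final value at position i, final contents of positions i+1..).
def pvPass (x : Int) : List Int → Int × List Int
  | [] => (x, [])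
  | y :: ys =>
    if x < y then
      let p := pvPass y ys
      (p.1, x :: p.2)
    else
      let p := pvPass x ys
      (p.1, y :: p.2)

theorem pvPass_snd_length (x : Int) (l : List Int) : (pvPass x l).2.length = l.length := by
  induction l generalizing x with
  | nil => simp [pvPass]
  | cons y ys ih => simp only [pvPass]; split <;> simp [ih]

-- outer loop of A (the i-loop): position i is fixed after its inner pass, recurse on the rest.
def pvExchangeSort : List Int → List Int
  | [] => []
  | x :: rest =>
    let p := pvPass x rest
    p.1 :: pvExchangeSort p.2
termination_by l => l.length
decreasing_by simp [pvPass_snd_length]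

def gabung_dan_urutkan (t1 : List Int) (t2 : List Int) : List Int :=
  pvExchangeSort (pvDedupA (t1 ++ t2))

-- ===== PORT B =====
def gabung_dan_urutkan_alt (t1 : List Int) (t2 : List Int) : List Int :=
  (PySem.List.sorted (t1 ++ t2) (fun x => x) true).foldl
    (fun hasil x => if hasil.getLast? = some x then hasil else hasil ++ [x]) []

-- ===== PRECONDITION & SPEC =====
def Spec_gabung_dan_urutkan (t1 : List Int) (t2 : List Int) (out : List Int) : Prop := out = gabung_dan_urutkan_alt t1 t2
instance (t1 : List Int) (t2 : List Int) (out : List Int) : Decidable (Spec_gabung_dan_urutkan t1 t2 out) := by unfold Spec_gabung_dan_urutkan; infer_instance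

-- ===== CLAIM (what is proved, stated in full; the proofs are below) =====
def Claim_equal_gabung_dan_urutkan : Prop := ∀ (t1 : List Int) (t2 : List Int), Dom_gabung_dan_urutkan t1 t2 → Spec_gabung_dan_urutkan t1 t2 (gabung_dan_urutkan t1 t2)

-- ===== LEMMAS AND PROOFS =====

theorem pvDedupA_aux (l acc : List Int) (hacc : acc.Nodup) :
    (l.foldl (fun acc angka => if angka ∈ acc then acc else acc ++ [angka]) acc).Nodup ∧
    ∀ x, x ∈ l.foldl (fun acc angka => if angka ∈ acc then acc else acc ++ [angka]) acc ↔ (x ∈ acc ∨ x ∈ l) := by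
  induction l generalizing acc with
  | nil => simpa using hacc
  | cons a l ih =>
    simp only [List.foldl_cons]
    by_cases h : a ∈ acc
    · simp only [if_pos h]
      obtain ⟨h1, h2⟩ := ih acc hacc
      refine ⟨h1, fun x => ?_⟩
      rw [h2 x]
      constructor
      · rintro (hx | hx) <;> simp [hx]
      · rintro (hx | hx)
        · exact Or.inl hx
        · rcases List.mem_cons.mp hx with rfl | hx
          · exact Or.inl h
          · exact Or.inr hx
    · simp only [if_neg h]
      have hacc' : (acc ++ [a]).Nodup := by
        simp only [List.nodup_append, List.nodup_singleton, true_and]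
        exact ⟨hacc, by intro b hb; simp; exact fun e => h (e ▸ hb)⟩
      obtain ⟨h1, h2⟩ := ih (acc ++ [a]) hacc'
      refine ⟨h1, fun x => ?_⟩
      rw [h2 x]
      simp [or_assoc]

theorem pvPass_perm (x : Int) (l : List Int) : ((pvPass x l).1 :: (pvPass x l).2).Perm (x :: l) := by
  induction l generalizing x with
  | nil => simp [pvPass]
  | cons y ys ih =>
    simp only [pvPass]
    split <;> dsimp only
    · exact (List.Perm.swap _ _ _).trans (List.Perm.cons x (ih y))
    · exact (List.Perm.swap _ _ _).trans ((List.Perm.cons y (ih x)).trans (List.Perm.swap _ _ _))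

theorem pvPass_ge (x : Int) (l : List Int) : x ≤ (pvPass x l).1 := by
  induction l generalizing x with
  | nil => simp [pvPass]
  | cons y ys ih =>
    simp only [pvPass]
    split <;> dsimp only
    · exact le_trans (le_of_lt (by assumption)) (ih y)
    · exact ih x

theorem pvPass_le (x : Int) (l : List Int) : ∀ z ∈ (pvPass x l).2, z ≤ (pvPass x l).1 := by
  induction l generalizing x with
  | nil => simp [pvPass]
  | cons y ys ih =>
    simp only [pvPass]
    split <;> dsimp only <;> intro z hz <;> simp only [List.mem_cons] at hz
    · rcases hz with rfl | hz
      · exact le_trans (le_of_lt (by assumption)) (pvPass_ge y ys)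
      · exact ih y z hz
    · rcases hz with rfl | hz
      · exact le_trans (by omega) (pvPass_ge x ys)
      · exact ih x z hz

theorem pvExchangeSort_perm (l : List Int) : (pvExchangeSort l).Perm l := by
  fun_induction pvExchangeSort with
  | case1 => rfl
  | case2 x rest p ih =>
    show (p.1 :: pvExchangeSort p.2).Perm (x :: rest)
    exact (List.Perm.cons p.1 ih).trans (pvPass_perm x rest)

theorem pvExchangeSort_pairwise (l : List Int) : (pvExchangeSort l).Pairwise (fun a b => b ≤ a) := by
  fun_induction pvExchangeSort with
  | case1 => simp
  | case2 x rest p ih =>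
    show (p.1 :: pvExchangeSort p.2).Pairwise (fun a b => b ≤ a)
    refine List.pairwise_cons.mpr ⟨?_, ih⟩
    intro b hb
    have hb' : b ∈ p.2 := (pvExchangeSort_perm p.2).mem_iff.mp hb
    exact pvPass_le x rest b hb'

theorem pairwise_gt_of_ge_nodup (l : List Int) (h1 : l.Pairwise (fun a b => b ≤ a)) (h2 : l.Nodup) :
    l.Pairwise (fun a b => b < a) := by
  have := h1.and h2
  exact this.imp (fun h => lt_of_le_of_ne h.1 (Ne.symm h.2))

theorem last_min (acc : List Int) (h : acc.Pairwise (fun a b => b < a)) :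
    ∀ a ∈ acc, ∀ m, acc.getLast? = some m → m ≤ a := by
  induction acc with
  | nil => simp
  | cons b bs ih =>
    intro a ha m hm
    rcases List.pairwise_cons.mp h with ⟨hb, hbs⟩
    simp only [List.mem_cons] at ha
    cases bs with
    | nil =>
      simp at hm ha
      omega
    | cons c cs =>
      rw [List.getLast?_cons_cons] at hm
      rcases ha with rfl | ha
      · have : m ∈ c :: cs := List.mem_of_getLast? hm
        exact le_of_lt (hb m this)
      · exact ih hbs a ha m hm

theorem adjDedup_aux (s acc : List Int)
    (hs : s.Pairwise (fun a b => b ≤ a))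
    (hacc : acc.Pairwise (fun a b => b < a))
    (hlast : ∀ y ∈ s, ∀ m, acc.getLast? = some m → y ≤ m) :
    (s.foldl (fun hasil x => if hasil.getLast? = some x then hasil else hasil ++ [x]) acc).Pairwise (fun a b => b < a) ∧
    ∀ x, x ∈ s.foldl (fun hasil x => if hasil.getLast? = some x then hasil else hasil ++ [x]) acc ↔ (x ∈ acc ∨ x ∈ s) := by
  induction s generalizing acc with
  | nil => simpa using hacc
  | cons y ys ih =>
    rcases List.pairwise_cons.mp hs with ⟨hy, hys⟩
    simp only [List.foldl_cons]
    by_cases h : acc.getLast? = some y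
    · simp only [if_pos h]
      have hmem : y ∈ acc := List.mem_of_getLast? h
      obtain ⟨h1, h2⟩ := ih acc hys hacc (fun z hz m hm => by
        rw [h] at hm; cases hm; exact hy z hz)
      refine ⟨h1, fun x => ?_⟩
      rw [h2 x]
      constructor
      · rintro (hx | hx) <;> simp [hx]
      · rintro (hx | hx)
        · exact Or.inl hx
        · rcases List.mem_cons.mp hx with rfl | hx
          · exact Or.inl hmem
          · exact Or.inr hx
    · simp only [if_neg h]
      have hlt : ∀ a ∈ acc, y < a := by
        intro a ha
        rcases hx : acc.getLast? with _ | m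
        · rcases acc with _ | ⟨b, bs⟩
          · simp at ha
          · simp [List.getLast?_eq_none_iff] at hx
        · have hym : y ≤ m := hlast y (by simp) m hx
          have hym' : y ≠ m := fun e => h (by rw [hx, e])
          exact lt_of_lt_of_le (lt_of_le_of_ne hym hym') (last_min acc hacc a ha m hx)
      have hacc' : (acc ++ [y]).Pairwise (fun a b => b < a) := by
        rw [List.pairwise_append]
        exact ⟨hacc, by simp, by intro a ha b hb; simp at hb; subst hb; exact hlt a ha⟩
      obtain ⟨h1, h2⟩ := ih (acc ++ [y]) hys hacc' (fun z hz m hm => by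
        rw [List.getLast?_concat] at hm; cases hm; exact hy z hz)
      refine ⟨h1, fun x => ?_⟩
      rw [h2 x]
      simp [or_assoc]

-- ===== VERDICT (by name: the statement is the Claim_ definition above) =====
theorem gabung_dan_urutkan_spec : Claim_equal_gabung_dan_urutkan := by
  intro t1 t2 _
  unfold Spec_gabung_dan_urutkan gabung_dan_urutkan gabung_dan_urutkan_alt pvDedupA
  set g := t1 ++ t2 with hg
  obtain ⟨hdn, hdm⟩ := pvDedupA_aux g [] (by simp)
  set d := g.foldl (fun acc angka => if angka ∈ acc then acc else acc ++ [angka]) [] with hd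
  -- A's result
  have hAperm : (pvExchangeSort d).Perm d := pvExchangeSort_perm d
  have hAnd : (pvExchangeSort d).Nodup := hAperm.nodup_iff.mpr hdn
  have hApw : (pvExchangeSort d).Pairwise (fun a b => b < a) :=
    pairwise_gt_of_ge_nodup _ (pvExchangeSort_pairwise d) hAnd
  have hAmem : ∀ x, x ∈ pvExchangeSort d ↔ x ∈ g := by
    intro x; rw [hAperm.mem_iff, hdm x]; simp
  -- B's result
  set s := PySem.List.sorted g (fun x => x) true with hsdef
  have hspw : s.Pairwise (fun a b => b ≤ a) := by
    have := PySem.List.sorted_pairwise_rev (xs := g) (key := fun x : Int => x)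
    exact this
  obtain ⟨hBpw, hBmem⟩ := adjDedup_aux s [] hspw (by simp) (by simp)
  set r := s.foldl (fun hasil x => if hasil.getLast? = some x then hasil else hasil ++ [x]) [] with hr
  have hBmem' : ∀ x, x ∈ r ↔ x ∈ g := by
    intro x
    rw [hBmem x]
    simp [hsdef, PySem.List.mem_sorted]
  have hBnd : r.Nodup := hBpw.imp (fun h => ne_of_gt h)
  have hperm : r.Perm (pvExchangeSort d) :=
    (List.perm_ext_iff_of_nodup hBnd hAnd).mpr (fun x => by rw [hBmem' x, hAmem x])
  have e1 := PySem.List.sorted_rev_eq_of_perm_of_pairwise_gt (pvExchangeSort d) r (fun x => x) hperm hBpw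
  have e2 := PySem.List.sorted_rev_eq_of_perm_of_pairwise_gt (pvExchangeSort d) (pvExchangeSort d) (fun x => x) (List.Perm.refl _) hApw
  exact e2.symm.trans e1
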